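-- pv_equiv track=rewrite | github.com/benceBalazs/bechha-infra | bechha_backend/opencv_shot_boundary_detection/detect_shot_boundaries.py | reduce_boundaries
-- ===== SOURCE A (Python) =====
-- def reduce_boundaries(boundaries):
--     if not boundaries:
--         return []
--
--     # Remove duplicates and sort
--     boundaries = sorted(set(boundaries))
--
--     reduced_boundaries = []
--     start = boundaries[0]
--
--     for i in range(1, len(boundaries)):
--         if boundaries[i] == boundaries[i-1] + 1:
--             # If current frame is consecutive to the previous one, skip adding it
--             continue
--
--         reduced_boundaries.append(start)
--         start = boundaries[i]
--
--     # Add the last pair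
--     reduced_boundaries.append(start)
--
--     return reduced_boundaries
-- ===== SOURCE B (Python) =====
-- def reduce_boundaries(boundaries):
--     if not boundaries:
--         return []
--     # Group the sorted unique frames by the key (value - index): within a
--     # maximal run of consecutive integers this key is constant, and it grows
--     # at every gap, so recording the first value seen per key yields exactly
--     # the start of each run, in order.
--     firsts = {}
--     for i, v in enumerate(sorted(set(boundaries))):
--         firsts.setdefault(v - i, v)
--     return list(firsts.values())
-- ===== Notes on version B (the rewrite author's own statement) =====
-- stated objective: idiomatic
-- what changed: Replaces the stateful adjacent-comparison scan carrying a 'start' variable with a group-by pass: each element of the sorted unique list is keyed by value minus index (constant on each run of consecutive integers), and a dict keeps the first value per key; its values are the run starts.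
import Mathlib
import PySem

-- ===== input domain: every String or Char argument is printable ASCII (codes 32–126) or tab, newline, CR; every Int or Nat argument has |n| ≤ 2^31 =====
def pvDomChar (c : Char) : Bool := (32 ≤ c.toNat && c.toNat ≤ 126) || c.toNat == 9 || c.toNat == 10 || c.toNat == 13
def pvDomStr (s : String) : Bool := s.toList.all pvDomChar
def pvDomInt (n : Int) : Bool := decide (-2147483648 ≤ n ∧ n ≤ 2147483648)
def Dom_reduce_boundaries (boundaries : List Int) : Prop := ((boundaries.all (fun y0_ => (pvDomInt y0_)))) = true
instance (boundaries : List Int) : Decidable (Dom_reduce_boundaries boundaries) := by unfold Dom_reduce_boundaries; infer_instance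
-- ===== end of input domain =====

-- B replaces A's stateful adjacent-comparison scan with a group-by-key pass
-- (key = value - index, constant on each run); dict-of-first-per-key values are the run starts.

-- ===== PORT A =====
def reduce_boundaries (boundaries : List Int) : List Int :=
  if boundaries = [] then []
  else
    let s := PySem.List.sorted (PySem.Set.ofList boundaries) (fun x => x) false
    let start := PySem.List.pyGetD s 0 0
    let st := (PySem.List.pyRange 1 (s.length : Int) 1).foldl
      (fun (st : List Int × Int) i =>
        if PySem.List.pyGetD s i 0 = PySem.List.pyGetD s (i-1) 0 + 1 then st
        else (st.1 ++ [st.2], PySem.List.pyGetD s i 0)) ([], start)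
    st.1 ++ [st.2]

-- ===== PORT B =====
def reduce_boundaries_alt (boundaries : List Int) : List Int :=
  if boundaries = [] then []
  else
    let s := PySem.List.sorted (PySem.Set.ofList boundaries) (fun x => x) false
    let firsts := (PySem.List.enumerate s).foldl
      (fun (d : PySem.Dict Int Int) p => d.setdefault (p.2 - p.1) p.2)
      PySem.Dict.empty
    firsts.values

-- ===== PRECONDITION & SPEC =====
def Spec_reduce_boundaries (boundaries : List Int) (out : List Int) : Prop := out = reduce_boundaries_alt boundaries
instance (boundaries : List Int) (out : List Int) : Decidable (Spec_reduce_boundaries boundaries out) := by unfold Spec_reduce_boundaries; infer_instance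

-- ===== CLAIM (what is proved, stated in full; the proofs are below) =====
def Claim_equal_reduce_boundaries : Prop := ∀ (boundaries : List Int), Dom_reduce_boundaries boundaries → Spec_reduce_boundaries boundaries (reduce_boundaries boundaries)

-- ===== LEMMAS AND PROOFS =====

-- structural form of A's index loop: carried previous element
def loopA : (List Int × Int) → Int → List Int → List Int × Int
  | st, _, [] => st
  | st, prev, x :: xs => if x = prev + 1 then loopA st x xs else loopA (st.1 ++ [st.2], x) x xs

-- A's fold over range(k, len(s)) equals loopA over the dropped suffix
lemma bridgeA (s : List Int) : ∀ (k : Nat) (st : List Int × Int), 1 ≤ k → k ≤ s.length →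
    (PySem.List.pyRange (k : Int) (s.length : Int) 1).foldl
      (fun (st : List Int × Int) i =>
        if PySem.List.pyGetD s i 0 = PySem.List.pyGetD s (i-1) 0 + 1 then st
        else (st.1 ++ [st.2], PySem.List.pyGetD s i 0)) st
    = loopA st (s.getD (k-1) 0) (s.drop k) := by
  intro k st hk hle
  induction hn : s.length - k generalizing k st with
  | zero =>
      have hk' : k = s.length := by omega
      subst hk'
      rw [PySem.List.pyRange_one_eq_nil (by omega)]
      simp [List.drop_of_length_le, loopA]
  | succ n ih =>
      have hklt : k < s.length := by omega
      rw [PySem.List.pyRange_one_cons (by exact_mod_cast hklt)]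
      simp only [List.foldl_cons]
      have h1 : (k : Int) - 1 = ((k - 1 : Nat) : Int) := by omega
      have hdrop : s.drop k = s[k] :: s.drop (k+1) := (List.getElem_cons_drop hklt).symm
      have hget : PySem.List.pyGetD s (k : Int) 0 = s.getD k 0 := PySem.List.pyGetD_natCast ..
      have hget' : PySem.List.pyGetD s ((k : Int) - 1) 0 = s.getD (k-1) 0 := by
        rw [h1]; exact PySem.List.pyGetD_natCast ..
      have hcast : ((k : Int) + 1) = ((k + 1 : Nat) : Int) := by omega
      have hgd : s.getD k 0 = s[k] := List.getD_eq_getElem s 0 hklt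
      rw [hget, hget', hcast, ih (k+1) _ (by omega) (by omega) (by omega), hdrop]
      have hk1 : (k+1) - 1 = k := by omega
      simp only [hk1, hgd, loopA]
      by_cases hc : s[k] = s.getD (k-1) 0 + 1
      · rw [if_pos hc, if_pos hc]
      · rw [if_neg hc, if_neg hc]

-- joint invariant: A's structural scan appended with its final start equals
-- the values of B's first-per-key dict, over any strictly increasing tail
lemma main_inv : ∀ (t : List Int) (st : List Int × Int) (prev : Int) (i : Int) (d : PySem.Dict Int Int),
    t.Pairwise (· < ·) → (∀ x ∈ t, prev < x) →
    d.values = st.1 ++ [st.2] →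
    d.contains (prev - (i - 1)) = true →
    (∀ k ∈ d.keys, k ≤ prev - (i - 1)) →
    (loopA st prev t).1 ++ [(loopA st prev t).2]
      = ((PySem.List.enumerate t i).foldl
          (fun (d : PySem.Dict Int Int) p => d.setdefault (p.2 - p.1) p.2) d).values := by
  intro t
  induction t with
  | nil => intro st prev i d _ _ hv _ _; simpa [loopA, PySem.List.enumerate_nil] using hv.symm
  | cons x xs ih =>
      intro st prev i d hpw hlt hv hcont hkeys
      have hxs_pw := (List.pairwise_cons.mp hpw).2
      have hx_lt := (List.pairwise_cons.mp hpw).1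
      have hprevx : prev < x := hlt x (List.mem_cons_self ..)
      rw [PySem.List.enumerate_cons]
      simp only [List.foldl_cons]
      by_cases hc : x = prev + 1
      · -- consecutive: key x - i = prev - (i-1) already present, dict unchanged
        have hkey : x - i = prev - (i - 1) := by omega
        have hsd : d.setdefault (x - i) x = d := by
          rw [hkey]; exact PySem.Dict.setdefault_of_contains d x hcont
        rw [hsd]
        simp only [loopA, if_pos hc]
        exact ih st x (i+1) d hxs_pw hx_lt hv
          (by have : x - (i + 1 - 1) = prev - (i - 1) := by omega
              rw [this]; exact hcont)
          (fun k hk => by have := hkeys k hk; omega)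
      · -- gap: key x - i is fresh and larger than every key; insert appends
        have hgap : prev - (i - 1) < x - i := by omega
        have hfresh : d.contains (x - i) = false := by
          by_contra h
          have hmem : (x - i) ∈ d.keys := (PySem.Dict.contains_iff_mem_keys d (x - i)).mp
            (by revert h; cases d.contains (x - i) <;> simp)
          have := hkeys _ hmem; omega
        have hsd : d.setdefault (x - i) x = d.insert (x - i) x :=
          PySem.Dict.setdefault_of_not_contains d x hfresh
        have hitems : (d.insert (x - i) x).items = d.items ++ [(x - i, x)] :=
          PySem.Dict.items_insert_of_not_contains d x hfresh
        have hvals : (d.insert (x - i) x).values = d.values ++ [x] := by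
          simp only [PySem.Dict.values, hitems, List.map_append, List.map_cons, List.map_nil]
        have hkeys' : (d.insert (x - i) x).keys = d.keys ++ [x - i] :=
          PySem.Dict.keys_insert_of_not_contains d x hfresh
        rw [hsd]
        simp only [loopA, if_neg hc]
        exact ih (st.1 ++ [st.2], x) x (i+1) _ hxs_pw
          hx_lt
          (by rw [hvals, hv])
          (by have : x - (i + 1 - 1) = x - i := by omega
              rw [this]; exact PySem.Dict.contains_insert_self d (x - i) x)
          (fun k hk => by
            rw [hkeys'] at hk
            rcases List.mem_append.mp hk with h | h
            · have := hkeys k h; omega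
            · simp at h; omega)

-- ===== VERDICT (by name: the statement is the Claim_ definition above) =====
theorem reduce_boundaries_spec : Claim_equal_reduce_boundaries := by
  intro boundaries _
  unfold Spec_reduce_boundaries reduce_boundaries reduce_boundaries_alt
  by_cases hb : boundaries = []
  · simp [hb]
  · simp only [if_neg hb]
    set s := PySem.List.sorted (PySem.Set.ofList boundaries) (fun x => x) false with hs
    have hpw : s.Pairwise (· < ·) := PySem.List.sorted_ofList_pairwise_lt boundaries
    have hsne : s ≠ [] := by
      rw [hs, Ne, PySem.List.sorted_eq_nil_iff]
      intro h
      rcases List.exists_mem_of_ne_nil boundaries hb with ⟨x, hx⟩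
      have : x ∈ PySem.Set.ofList boundaries := (PySem.Set.mem_ofList boundaries x).mpr hx
      simp [h] at this
    obtain ⟨v, t, hvt⟩ := List.exists_cons_of_ne_nil hsne
    have hlen : 1 ≤ s.length := by rw [hvt]; simp
    have hbr := bridgeA s 1 ([], PySem.List.pyGetD s 0 0) le_rfl hlen
    simp only [Nat.cast_one] at hbr
    rw [hbr]
    have hget0 : PySem.List.pyGetD s 0 0 = v := by rw [hvt]; exact PySem.List.pyGetD_zero_cons ..
    have hgd0 : s.getD (1-1) 0 = v := by rw [hvt]; rfl
    have hdrop1 : s.drop 1 = t := by rw [hvt]; rfl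
    rw [hget0, hgd0, hdrop1, hvt]
    rw [PySem.List.enumerate_cons]
    simp only [List.foldl_cons]
    have hfresh : (PySem.Dict.empty : PySem.Dict Int Int).contains (v - 0) = false :=
      PySem.Dict.contains_empty (v - 0)
    rw [PySem.Dict.setdefault_of_not_contains PySem.Dict.empty v hfresh]
    have hpw' := List.pairwise_cons.mp (hvt ▸ hpw)
    refine main_inv t ([], v) v 1 _ hpw'.2 hpw'.1 ?_ ?_ ?_
    · rw [PySem.Dict.values, PySem.Dict.items_insert_of_not_contains PySem.Dict.empty v hfresh]
      rfl
    · have : v - (1 - 1 : Int) = v - 0 := by omega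
      rw [this]; exact PySem.Dict.contains_insert_self PySem.Dict.empty (v - 0) v
    · intro k hk
      rw [PySem.Dict.keys_insert_of_not_contains PySem.Dict.empty v hfresh] at hk
      simp [PySem.Dict.empty, PySem.Dict.keys] at hk
      omega
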